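-- pv_equiv track=rewrite | github.com/AqsaMakhdoomi/Two-sided-fair-route-recommendation | Recommendation/Baselines/NAdap.py | find_k_elements
-- ===== SOURCE A (Python) =====
-- def find_k_elements(la,loc_sparsity_arr,x,y,k):
--
--     xarr=[]
--     yarr=[]
--     da=la.copy()
--
--     da.sort()
--
--     da=da[:k]
--     az=0
--
--     a=la.copy()
--     b=da.copy()
--
--     az = 0
--     ind = 0
--     dup = {}
--     indices = []
--     for i in b:
--
--         if i in dup:
--             ind = dup[i]
--             ind = ind + a[ind:].index(i) + 1
--
--             indices.append(ind - 1)
--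
--             dup[i] = ind
--             az = az + ind
--
--         else:
--             ind1 = a.index(i)
--
--             dup[i] = ind1 + 1
--             indices.append(ind1)
--
--     for i in indices:
--
--         xarr.append(x[i])
--         yarr.append(y[i])
--
--     return xarr, yarr
-- ===== SOURCE B (Python) =====
-- def find_k_elements(la, loc_sparsity_arr, x, y, k):
--     # selection without sorting: repeatedly pick the unused index with the
--     # smallest value (ties: smallest index), m = len(la[:k]) times
--     m = len(la[:k])
--     used = set()
--     indices = []
--     for _ in range(m):
--         best = -1
--         for i in range(len(la)):
--             if i not in used and (best == -1 or la[i] < la[best]):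
--                 best = i
--         used.add(best)
--         indices.append(best)
--     xarr = [x[i] for i in indices]
--     yarr = [y[i] for i in indices]
--     return xarr, yarr
-- ===== Notes on version B (the rewrite author's own statement) =====
-- stated objective: alternative
-- what changed: Replaces A's sort-then-relocate scheme (sort a copy, take the first k values, recover each value's index with repeated list.index scans steered by a duplicate-count dict) with a sort-free selection: repeat len(la[:k]) times a scan for the unused index with the smallest value (ties: smallest index), collecting indices directly.
-- outside the precondition, e.g. on find_k_elements([1, 5], [], [7], [9], 1): A returns ([7], [9]), B returns ([7], [9])
import Mathlib
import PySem

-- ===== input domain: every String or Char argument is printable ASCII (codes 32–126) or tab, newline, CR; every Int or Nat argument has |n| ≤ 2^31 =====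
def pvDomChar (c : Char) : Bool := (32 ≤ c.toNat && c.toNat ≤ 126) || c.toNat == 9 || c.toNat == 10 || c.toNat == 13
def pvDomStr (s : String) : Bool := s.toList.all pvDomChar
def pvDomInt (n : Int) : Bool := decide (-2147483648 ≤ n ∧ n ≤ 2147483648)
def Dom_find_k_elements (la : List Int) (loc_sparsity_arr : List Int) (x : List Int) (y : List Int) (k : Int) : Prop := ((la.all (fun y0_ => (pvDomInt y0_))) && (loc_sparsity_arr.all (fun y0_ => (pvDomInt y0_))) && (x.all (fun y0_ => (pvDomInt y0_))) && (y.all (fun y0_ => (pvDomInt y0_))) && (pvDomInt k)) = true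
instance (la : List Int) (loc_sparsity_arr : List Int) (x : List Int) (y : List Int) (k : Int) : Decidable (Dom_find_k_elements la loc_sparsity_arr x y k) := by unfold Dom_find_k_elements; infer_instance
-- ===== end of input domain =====

-- B replaces A's sort-then-relocate-with-.index scheme by a sort-free repeated
-- minimum-selection over unused indices (alternative algorithm, same results).

-- ===== PORT A =====
/-- body of A's `for i in b:` loop; state is (az, ind, dup, indices) -/
def pvAStep (la : List Int) (st : Int × Int × PySem.Dict Int Int × List Int) (i : Int) :
    Int × Int × PySem.Dict Int Int × List Int :=
  let az := st.1
  let dup := st.2.2.1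
  let indices := st.2.2.2
  match dup.get? i with
  | some d =>
      -- ind = dup[i]; ind = ind + a[ind:].index(i) + 1; indices.append(ind-1); dup[i]=ind; az=az+ind
      let ind := d
      let ind := ind + (((PySem.List.index? (PySem.List.slice la (some ind) none) i).getD 0 : Nat) : Int) + 1
      let indices := indices ++ [ind - 1]
      let dup := dup.insert i ind
      let az := az + ind
      (az, ind, dup, indices)
  | none =>
      -- ind1 = a.index(i); dup[i] = ind1 + 1; indices.append(ind1)
      let ind1 : Int := (((PySem.List.index? la i).getD 0 : Nat) : Int)
      let dup := dup.insert i (ind1 + 1)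
      let indices := indices ++ [ind1]
      (az, st.2.1, dup, indices)

def find_k_elements (la : List Int) (loc_sparsity_arr : List Int) (x : List Int) (y : List Int) (k : Int) : List Int × List Int :=
  -- xarr=[]; yarr=[]; da=la.copy(); da.sort(); da=da[:k]
  let da := PySem.List.sorted la (fun v => v) false
  let da := PySem.List.slice da none (some k)
  let b := da
  -- az = 0; ind = 0; dup = {}; indices = []; for i in b: …  (a = la)
  let st := b.foldl (pvAStep la) (0, 0, PySem.Dict.empty, [])
  let indices := st.2.2.2
  -- for i in indices: xarr.append(x[i]); yarr.append(y[i])   (x[i]: IndexError excluded by Pre_)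
  indices.foldl (fun (p : List Int × List Int) i =>
      (p.1 ++ [PySem.List.pyGetD x i 0], p.2 ++ [PySem.List.pyGetD y i 0])) ([], [])

-- ===== PORT B =====
/-- B's inner scan: the unused index of `la` with the smallest value (ties: smallest index), -1 if none -/
def pvBFind (la : List Int) (used : PySem.Set Int) : Int :=
  (PySem.List.pyRange 0 (la.length : Int) 1).foldl (fun best i =>
      if ¬ (PySem.Set.contains used i = true) ∧
         (best = -1 ∨ PySem.List.pyGetD la i 0 < PySem.List.pyGetD la best 0)
      then i else best) (-1)

/-- body of B's `for _ in range(m):` loop; state is (used, indices) -/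
def pvBStep (la : List Int) (st : PySem.Set Int × List Int) (_ : Int) : PySem.Set Int × List Int :=
  let best := pvBFind la st.1
  (PySem.Set.add st.1 best, st.2 ++ [best])

def find_k_elements_alt (la : List Int) (loc_sparsity_arr : List Int) (x : List Int) (y : List Int) (k : Int) : List Int × List Int :=
  -- m = len(la[:k])
  let m := (PySem.List.slice la none (some k)).length
  -- used = set(); indices = []; for _ in range(m): …
  let st := (PySem.List.pyRange 0 (m : Int) 1).foldl (pvBStep la) (PySem.Set.empty, [])
  -- xarr = [x[i] for i in indices]; yarr = [y[i] for i in indices]  (x[i]: IndexError excluded by Pre_)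
  (st.2.map (fun i => PySem.List.pyGetD x i 0), st.2.map (fun i => PySem.List.pyGetD y i 0))

-- ===== PRECONDITION & SPEC =====
-- Pre_ restricts to the natural parallel-array domain (x and y at least as long as la),
-- plus the trivially safe case len(la[:k]) = 0 where nothing is indexed: A indexes x and y
-- at positions of elements of la and raises IndexError when they are shorter; on a few
-- shorter inputs A still returns (all selected positions happen to be small) — excluded.
def Pre_find_k_elements (la : List Int) (loc_sparsity_arr : List Int) (x : List Int) (y : List Int) (k : Int) : Prop :=
  (la.length ≤ x.length ∧ la.length ≤ y.length) ∨ (PySem.List.slice la none (some k)).length = 0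
instance (la : List Int) (loc_sparsity_arr : List Int) (x : List Int) (y : List Int) (k : Int) : Decidable (Pre_find_k_elements la loc_sparsity_arr x y k) := by unfold Pre_find_k_elements; infer_instance

def pvWitness_find_k_elements : List Int × List Int × List Int × List Int × Int :=
  ([3, 1, 2, 1], [], [10, 20, 30, 40], [50, 60, 70, 80], 3)

def Spec_find_k_elements (la : List Int) (loc_sparsity_arr : List Int) (x : List Int) (y : List Int) (k : Int) (out : List Int × List Int) : Prop := out = find_k_elements_alt la loc_sparsity_arr x y k
instance (la : List Int) (loc_sparsity_arr : List Int) (x : List Int) (y : List Int) (k : Int) (out : List Int × List Int) : Decidable (Spec_find_k_elements la loc_sparsity_arr x y k out) := by unfold Spec_find_k_elements; infer_instance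

-- ===== CLAIM (what is proved, stated in full; the proofs are below) =====
def Claim_equal_find_k_elements : Prop := ∀ (la : List Int) (loc_sparsity_arr : List Int) (x : List Int) (y : List Int) (k : Int), Dom_find_k_elements la loc_sparsity_arr x y k → Pre_find_k_elements la loc_sparsity_arr x y k → Spec_find_k_elements la loc_sparsity_arr x y k (find_k_elements la loc_sparsity_arr x y k)

-- ===== LEMMAS AND PROOFS =====

-- proof-side vocabulary -------------------------------------------------------
/-- positions of `v` in `la`, in increasing order -/
def pvOccs (la : List Int) (v : Int) : List Nat :=
  match la with
  | [] => []
  | a :: l => (if a = v then [0] else []) ++ (pvOccs l v).map (· + 1)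

/-- `la` sorted ascending (what `da.sort()` produces) -/
def pvS (la : List Int) : List Int := PySem.List.sorted la (fun v => v) false

/-- copies of `v` among the first `t` sorted values -/
def pvCnt (la : List Int) (t : Nat) (v : Int) : Nat := ((pvS la).take t).count v

/-- the la-index produced at step `t`: the `pvCnt`-th occurrence of the `t`-th sorted value -/
def pvIdx (la : List Int) (t : Nat) : Nat :=
  pvOccs la ((pvS la).getD t 0) |>.getD (pvCnt la t ((pvS la).getD t 0)) 0

-- occurrence-list facts -------------------------------------------------------
theorem pv_mem_occs (la : List Int) (v : Int) (i : Nat) :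
    i ∈ pvOccs la v ↔ i < la.length ∧ la.getD i 0 = v := by
  induction la generalizing i with
  | nil => simp [pvOccs]
  | cons a l ih =>
    cases i with
    | zero => simp [pvOccs, apply_ite (0 ∈ ·)]
    | succ j => simp [pvOccs, ih, apply_ite (j + 1 ∈ ·)]

theorem pv_pairwise_occs (la : List Int) (v : Int) : (pvOccs la v).Pairwise (· < ·) := by
  induction la with
  | nil => simp [pvOccs]
  | cons a l ih =>
    refine List.pairwise_append.2 ⟨?_, (List.pairwise_map.2 (ih.imp (by omega))), ?_⟩
    · split <;> simp
    · intro p hp q hq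
      obtain ⟨b, -, rfl⟩ := List.mem_map.1 hq
      have : p = 0 := by split at hp <;> simp_all
      omega

theorem pv_length_occs (la : List Int) (v : Int) : (pvOccs la v).length = la.count v := by
  induction la with
  | nil => simp [pvOccs]
  | cons a l ih =>
    by_cases h : a = v <;> simp [pvOccs, h, ih, List.count_cons]

theorem pv_getD_map_succ (X : List Nat) {c : Nat} (h : c < X.length) :
    (X.map (· + 1)).getD c 0 = X.getD c 0 + 1 := by
  rw [List.getD_eq_getElem _ _ (by simpa using h), List.getD_eq_getElem _ _ h, List.getElem_map]

theorem pv_occs_take_count (la : List Int) (v : Int) :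
    ∀ c, c < (pvOccs la v).length →
      (la.take ((pvOccs la v).getD c 0)).count v = c := by
  induction la with
  | nil => simp [pvOccs]
  | cons a l ih =>
    intro c hc
    by_cases h : a = v
    · simp only [pvOccs, if_pos h] at hc ⊢
      cases c with
      | zero => simp
      | succ c =>
        simp only [List.singleton_append, List.length_cons, List.length_map] at hc
        have hc' : c < (pvOccs l v).length := by omega
        simp only [List.singleton_append, List.getD_cons_succ, pv_getD_map_succ _ hc',
          List.take_succ_cons, List.count_cons, ih c hc', h]
        simp
    · simp only [pvOccs, if_neg h, List.nil_append, List.length_map] at hc ⊢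
      simp only [pv_getD_map_succ _ hc, List.take_succ_cons, List.count_cons, ih c hc]
      simp [h]

theorem pv_occs_pos (la : List Int) (v : Int) :
    ∀ i, i < la.length → la.getD i 0 = v →
      (la.take i).count v < (pvOccs la v).length ∧
      (pvOccs la v).getD ((la.take i).count v) 0 = i := by
  induction la with
  | nil => simp
  | cons a l ih =>
    intro i hi hv
    cases i with
    | zero =>
      simp only [List.getD_cons_zero] at hv
      simp [pvOccs, hv]
    | succ j =>
      simp only [List.getD_cons_succ] at hv
      simp only [List.length_cons] at hi
      obtain ⟨h1, h2⟩ := ih j (by omega) hv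
      by_cases h : a = v
      · subst h
        rw [List.take_succ_cons, List.count_cons_self]
        have hocc : pvOccs (a :: l) a = 0 :: (pvOccs l a).map (· + 1) := by
          simp [pvOccs]
        rw [hocc]
        refine ⟨by simp; omega, ?_⟩
        rw [List.getD_cons_succ, pv_getD_map_succ _ h1, h2]
      · have hcnt : List.count v (a :: List.take j l) = List.count v (List.take j l) := by
          simp [List.count_cons, h]
        rw [List.take_succ_cons, hcnt]
        have hocc : pvOccs (a :: l) v = (pvOccs l v).map (· + 1) := by
          simp [pvOccs, h]
        rw [hocc]
        refine ⟨by simpa using h1, ?_⟩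
        rw [pv_getD_map_succ _ h1, h2]

theorem pv_occs_getD_strict (la : List Int) (v : Int) {c c' : Nat} (h : c < c')
    (h' : c' < (pvOccs la v).length) :
    (pvOccs la v).getD c 0 < (pvOccs la v).getD c' 0 := by
  have hp := pv_pairwise_occs la v
  rw [List.pairwise_iff_getElem] at hp
  rw [List.getD_eq_getElem _ _ (by omega), List.getD_eq_getElem _ _ h']
  exact hp c c' (by omega) h' h

theorem pv_occs_getD_mono (la : List Int) (v : Int) {c c' : Nat} (h : c ≤ c')
    (h' : c' < (pvOccs la v).length) :
    (pvOccs la v).getD c 0 ≤ (pvOccs la v).getD c' 0 := by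
  rcases Nat.lt_or_ge c c' with hlt | hge
  · exact le_of_lt (pv_occs_getD_strict la v hlt h')
  · have : c = c' := by omega
    simp [this]



theorem pv_index?_eq_head (la : List Int) (v : Int) :
    PySem.List.index? la v = (pvOccs la v).head? := by
  induction la with
  | nil => simp [pvOccs, PySem.List.index?]
  | cons a l ih =>
    by_cases h : a = v
    · subst h
      rw [PySem.List.index?_cons_self]
      simp [pvOccs]
    · rw [PySem.List.index?_cons_of_ne _ h, ih]
      simp [pvOccs, h, List.head?_map]

theorem pv_occs_drop (la : List Int) (v : Int) :
    ∀ d, ∀ (l : List Int), pvOccs (l.drop d) v =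
      ((pvOccs l v).filter (fun i => decide (d ≤ i))).map (· - d) := by
  intro d
  induction d with
  | zero =>
    intro l
    simp [List.filter_true]
  | succ d ih =>
    intro l
    cases l with
    | nil => simp [pvOccs]
    | cons a t =>
      rw [List.drop_succ_cons, ih t]
      have step : (pvOccs (a :: t) v).filter (fun i => decide (d + 1 ≤ i)) =
          ((pvOccs t v).filter (fun i => decide (d ≤ i))).map (· + 1) := by
        simp only [pvOccs, List.filter_append, List.filter_map]
        have h0 : ((if a = v then [0] else []).filter (fun i => decide (d + 1 ≤ i))) = ([] : List Nat) := by
          split <;> simp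
        rw [h0, List.nil_append]
        congr 1
        apply List.filter_congr
        intro x _
        simp only [Function.comp_apply, decide_eq_decide]
        omega
      rw [step, List.map_map]
      apply List.map_congr_left
      intro x hx
      simp only [Function.comp_apply]
      omega

theorem pv_filter_ge_eq_drop (la : List Int) (v : Int) {c' : Nat}
    (h : c' + 1 < (pvOccs la v).length) :
    (pvOccs la v).filter (fun i => decide ((pvOccs la v).getD c' 0 + 1 ≤ i)) =
      (pvOccs la v).drop (c' + 1) := by
  set d := (pvOccs la v).getD c' 0 + 1 with hd
  conv_lhs => rw [← List.take_append_drop (c' + 1) (pvOccs la v)]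
  rw [List.filter_append]
  have h1 : ((pvOccs la v).take (c' + 1)).filter (fun i => decide (d ≤ i)) = [] := by
    rw [List.filter_eq_nil_iff]
    intro x hx
    obtain ⟨i, hil, hieq⟩ := List.getElem_of_mem hx
    have hi2 : i < c' + 1 ∧ i < (pvOccs la v).length := by
      simp only [List.length_take] at hil; omega
    simp only [List.getElem_take] at hieq
    have hle := pv_occs_getD_mono la v (show i ≤ c' from by omega)
      (show c' < (pvOccs la v).length from by omega)
    rw [List.getD_eq_getElem _ _ hi2.2] at hle
    rw [hieq] at hle
    simp only [decide_eq_true_eq]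
    omega
  have h2 : ((pvOccs la v).drop (c' + 1)).filter (fun i => decide (d ≤ i)) =
      (pvOccs la v).drop (c' + 1) := by
    rw [List.filter_eq_self]
    intro x hx
    obtain ⟨i, hil, hieq⟩ := List.getElem_of_mem hx
    have hlen : c' + 1 + i < (pvOccs la v).length := by
      simp only [List.length_drop] at hil; omega
    simp only [List.getElem_drop] at hieq
    have hlt := pv_occs_getD_strict la v (show c' < c' + 1 + i from by omega) hlen
    rw [List.getD_eq_getElem _ _ hlen] at hlt
    rw [hieq] at hlt
    simp only [decide_eq_true_eq]
    omega
  rw [h1, h2, List.nil_append]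

/-- first occurrence of `v` in `la` at position ≥ occ(c')+1 is occ(c'+1) -/
theorem pv_index?_drop (la : List Int) (v : Int) {c' : Nat} (h : c' + 1 < (pvOccs la v).length) :
    PySem.List.index? (la.drop ((pvOccs la v).getD c' 0 + 1)) v =
      some ((pvOccs la v).getD (c' + 1) 0 - ((pvOccs la v).getD c' 0 + 1)) := by
  rw [pv_index?_eq_head, pv_occs_drop la v _ la, pv_filter_ge_eq_drop la v h,
    List.head?_map, List.head?_drop, List.getElem?_eq_getElem h,
    List.getD_eq_getElem _ _ h]
  rfl

-- sorted-list facts -----------------------------------------------------------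
theorem pv_s_perm (la : List Int) : (pvS la).Perm la := PySem.List.sorted_perm la _ _

theorem pv_s_len (la : List Int) : (pvS la).length = la.length := (pv_s_perm la).length_eq

theorem pv_s_count (la : List Int) (v : Int) : (pvS la).count v = la.count v :=
  (pv_s_perm la).count_eq v

theorem pv_s_pairwise (la : List Int) : (pvS la).Pairwise (· ≤ ·) := by
  have := PySem.List.sorted_pairwise (xs := la) (key := fun v => v)
  simpa using this

theorem pv_s_drop_ge (la : List Int) {t : Nat} (ht : t < (pvS la).length) :
    ∀ w ∈ (pvS la).drop t, (pvS la).getD t 0 ≤ w := by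
  intro w hw
  rw [List.drop_eq_getElem_cons ht] at hw
  rw [List.getD_eq_getElem _ _ ht]
  rcases List.mem_cons.1 hw with rfl | hmem
  · exact le_refl _
  · have hp : ((pvS la)[t] :: (pvS la).drop (t+1)).Pairwise (· ≤ ·) := by
      rw [← List.drop_eq_getElem_cons ht]
      exact (pv_s_pairwise la).drop
    exact (List.pairwise_cons.1 hp).1 w hmem

theorem pv_cnt_succ (la : List Int) (t : Nat) (v : Int) (ht : t < (pvS la).length) :
    pvCnt la (t + 1) v = pvCnt la t v + (if (pvS la).getD t 0 = v then 1 else 0) := by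
  unfold pvCnt
  rw [List.take_succ_eq_append_getElem ht, List.count_append,
    List.getD_eq_getElem _ _ ht]
  by_cases hv : (pvS la)[t] = v
  · simp [hv]
  · have hv' : ¬ v = (pvS la)[t] := fun he => hv he.symm
    simp [hv, hv']

theorem pv_cnt_mono (la : List Int) {t t' : Nat} (h : t ≤ t') (v : Int) :
    pvCnt la t v ≤ pvCnt la t' v := by
  unfold pvCnt
  have h1 : (pvS la).take t = ((pvS la).take t').take t := by
    rw [List.take_take, Nat.min_eq_left h]
  rw [h1]
  exact (List.take_sublist _ _).count_le v

theorem pv_cnt_le_count (la : List Int) (t : Nat) (v : Int) : pvCnt la t v ≤ la.count v := by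
  rw [← pv_s_count]
  exact (List.take_sublist _ _).count_le v

theorem pv_cnt_lt_count (la : List Int) {t : Nat} (ht : t < la.length) :
    pvCnt la t ((pvS la).getD t 0) < la.count ((pvS la).getD t 0) := by
  have ht' : t < (pvS la).length := by rw [pv_s_len]; exact ht
  have h1 := pv_cnt_succ la t ((pvS la).getD t 0) ht'
  rw [if_pos rfl] at h1
  have h2 := pv_cnt_le_count la (t + 1) ((pvS la).getD t 0)
  omega

theorem pv_cnt_exists (la : List Int) (v : Int) :
    ∀ t j, j < pvCnt la t v →
      ∃ u, u < t ∧ u < (pvS la).length ∧ (pvS la).getD u 0 = v ∧ pvCnt la u v = j := by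
  intro t
  induction t with
  | zero => intro j hj; simp [pvCnt] at hj
  | succ t ih =>
    intro j hj
    by_cases hlt : t < (pvS la).length
    · rw [pv_cnt_succ la t v hlt] at hj
      by_cases hv : (pvS la).getD t 0 = v
      · rw [if_pos hv] at hj
        rcases Nat.lt_or_ge j (pvCnt la t v) with hc | hc
        · obtain ⟨u, h1, h2, h3, h4⟩ := ih j hc
          exact ⟨u, by omega, h2, h3, h4⟩
        · exact ⟨t, by omega, hlt, hv, by omega⟩
      · rw [if_neg hv, Nat.add_zero] at hj
        obtain ⟨u, h1, h2, h3, h4⟩ := ih j hj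
        exact ⟨u, by omega, h2, h3, h4⟩
    · have heq : pvCnt la (t + 1) v = pvCnt la t v := by
        unfold pvCnt
        rw [List.take_of_length_le (by omega), List.take_of_length_le (by omega)]
      rw [heq] at hj
      obtain ⟨u, h1, h2, h3, h4⟩ := ih j hj
      exact ⟨u, by omega, h2, h3, h4⟩

-- pvIdx facts -----------------------------------------------------------------
theorem pv_idx_lt (la : List Int) {t : Nat} (ht : t < la.length) :
    pvIdx la t < la.length ∧ la.getD (pvIdx la t) 0 = (pvS la).getD t 0 := by
  have h1 : pvCnt la t ((pvS la).getD t 0) < (pvOccs la ((pvS la).getD t 0)).length := by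
    rw [pv_length_occs]; exact pv_cnt_lt_count la ht
  have h2 : pvIdx la t ∈ pvOccs la ((pvS la).getD t 0) := by
    unfold pvIdx
    rw [List.getD_eq_getElem _ _ h1]
    exact List.getElem_mem _
  exact (pv_mem_occs la _ _).1 h2

theorem pv_idx_numocc (la : List Int) {t : Nat} (ht : t < la.length) :
    (la.take (pvIdx la t)).count ((pvS la).getD t 0) = pvCnt la t ((pvS la).getD t 0) := by
  have h1 : pvCnt la t ((pvS la).getD t 0) < (pvOccs la ((pvS la).getD t 0)).length := by
    rw [pv_length_occs]; exact pv_cnt_lt_count la ht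
  exact pv_occs_take_count la _ _ h1

/-- which indices have been picked during the first `t` steps -/
theorem pv_used_iff (la : List Int) {t : Nat} (ht : t ≤ la.length) {i : Nat} (hi : i < la.length) :
    (∃ u, u < t ∧ pvIdx la u = i) ↔
      (la.take i).count (la.getD i 0) < pvCnt la t (la.getD i 0) := by
  constructor
  · rintro ⟨u, hu, rfl⟩
    have hun : u < la.length := by omega
    obtain ⟨-, hkey⟩ := pv_idx_lt la hun
    rw [hkey, pv_idx_numocc la hun]
    have hu' : u < (pvS la).length := by rw [pv_s_len]; omega
    have h1 := pv_cnt_succ la u ((pvS la).getD u 0) hu'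
    rw [if_pos rfl] at h1
    have h2 := pv_cnt_mono la (show u + 1 ≤ t by omega) ((pvS la).getD u 0)
    omega
  · intro hlt
    obtain ⟨u, h1, h2, h3, h4⟩ := pv_cnt_exists la (la.getD i 0) t _ hlt
    refine ⟨u, h1, ?_⟩
    have hun : u < la.length := by rw [← pv_s_len la]; exact h2
    obtain ⟨hop1, hop2⟩ := pv_occs_pos la (la.getD i 0) i hi rfl
    unfold pvIdx
    rw [h3, h4, hop2]



/-- unused indices carry values ≥ the t-th sorted value, and on equal value an index ≥ pvIdx t -/
theorem pv_sel_min (la : List Int) {t : Nat} (ht : t < la.length) {i : Nat} (hi : i < la.length)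
    (hun : ¬ (la.take i).count (la.getD i 0) < pvCnt la t (la.getD i 0)) :
    la.getD (pvIdx la t) 0 < la.getD i 0 ∨
      (la.getD (pvIdx la t) 0 = la.getD i 0 ∧ pvIdx la t ≤ i) := by
  have ht' : t < (pvS la).length := by rw [pv_s_len]; exact ht
  set v := la.getD i 0 with hv
  obtain ⟨hnum_lt, hnum_eq⟩ := pv_occs_pos la v i hi rfl
  -- v appears in the dropped part of the sorted list
  have hcount : (pvS la).count v = ((pvS la).take t).count v + ((pvS la).drop t).count v := by
    conv_lhs => rw [← List.take_append_drop t (pvS la)]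
    rw [List.count_append]
  have hnum_count : (la.take i).count v < la.count v := by
    have h' := hnum_lt
    rw [pv_length_occs] at h'
    exact h'
  have hdrop_pos : 0 < ((pvS la).drop t).count v := by
    have := pv_s_count la v
    have := pv_cnt_le_count la t v
    unfold pvCnt at hun
    omega
  have hmem : v ∈ (pvS la).drop t := List.count_pos_iff.1 hdrop_pos
  have hge : (pvS la).getD t 0 ≤ v := pv_s_drop_ge la ht' v hmem
  obtain ⟨-, hkey⟩ := pv_idx_lt la ht
  rcases lt_or_eq_of_le hge with hlt | heq
  · left; rw [hkey]; exact hlt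
  · right
    constructor
    · rw [hkey, heq]
    · -- equal values: i is a later occurrence of v than pvIdx t
      have hcv : pvCnt la t v ≤ (la.take i).count v := by omega
      have : pvIdx la t = (pvOccs la v).getD (pvCnt la t v) 0 := by
        unfold pvIdx; rw [heq]
      rw [this, ← hnum_eq]
      exact pv_occs_getD_mono la v hcv hnum_lt

-- slice m facts ---------------------------------------------------------------
theorem pv_slice_none_some (xs : List Int) (k : Int) :
    PySem.List.slice xs none (some k) = xs.take (PySem.List.clampIdx xs.length k) := by
  show List.take _ (List.drop _ xs) = _
  simp [PySem.List.clampIdx]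

theorem pv_slice_to_take (xs : List Int) (k : Int) :
    PySem.List.slice xs none (some k) = xs.take (PySem.List.slice xs none (some k)).length := by
  rw [pv_slice_none_some, List.length_take,
    Nat.min_eq_left (PySem.List.clampIdx_le xs.length k)]

theorem pv_m_eq (la : List Int) (k : Int) :
    (PySem.List.slice (pvS la) none (some k)).length = (PySem.List.slice la none (some k)).length := by
  rw [pv_slice_none_some, pv_slice_none_some, List.length_take, List.length_take, pv_s_len]

theorem pv_m_le (la : List Int) (k : Int) :
    (PySem.List.slice la none (some k)).length ≤ la.length := by
  rw [pv_slice_none_some, List.length_take]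
  omega

-- A loop ----------------------------------------------------------------------
theorem pv_step_none (la : List Int) (az ind : Int) (dup : PySem.Dict Int Int)
    (acc : List Int) (v : Int) (h : dup.get? v = none) :
    pvAStep la (az, ind, dup, acc) v =
      (az, ind, dup.insert v ((((PySem.List.index? la v).getD 0 : Nat) : Int) + 1),
        acc ++ [(((PySem.List.index? la v).getD 0 : Nat) : Int)]) := by
  simp [pvAStep, h]

theorem pv_step_some (la : List Int) (az ind : Int) (dup : PySem.Dict Int Int)
    (acc : List Int) (v d : Int) (h : dup.get? v = some d) :
    pvAStep la (az, ind, dup, acc) v =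
      (az + (d + (((PySem.List.index? (PySem.List.slice la (some d) none) v).getD 0 : Nat) : Int) + 1),
       d + (((PySem.List.index? (PySem.List.slice la (some d) none) v).getD 0 : Nat) : Int) + 1,
       dup.insert v (d + (((PySem.List.index? (PySem.List.slice la (some d) none) v).getD 0 : Nat) : Int) + 1),
       acc ++ [d + (((PySem.List.index? (PySem.List.slice la (some d) none) v).getD 0 : Nat) : Int) + 1 - 1]) := by
  simp [pvAStep, h]

theorem pv_A_loop (la : List Int) (k : Int) :
    ∀ (rest : List Int) (t : Nat) (az ind : Int) (dup : PySem.Dict Int Int) (acc : List Int),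
      t ≤ (PySem.List.slice la none (some k)).length →
      rest = (PySem.List.slice (pvS la) none (some k)).drop t →
      (∀ w, dup.get? w = if pvCnt la t w = 0 then none
          else some ((((pvOccs la w).getD (pvCnt la t w - 1) 0 : Nat) : Int) + 1)) →
      (rest.foldl (pvAStep la) (az, ind, dup, acc)).2.2.2 =
        acc ++ (List.range' t ((PySem.List.slice la none (some k)).length - t)).map
          (fun u => ((pvIdx la u : Nat) : Int)) := by
  intro rest
  induction rest with
  | nil =>
    intro t az ind dup acc ht hrest hdup
    have h0 := congrArg List.length hrest
    rw [List.length_drop, pv_m_eq] at h0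
    simp only [List.length_nil] at h0
    have : (PySem.List.slice la none (some k)).length - t = 0 := by omega
    rw [this]
    simp
  | cons v rest' ih =>
    intro t az ind dup acc ht hrest hdup
    have hBl : (PySem.List.slice (pvS la) none (some k)).length =
        (PySem.List.slice la none (some k)).length := pv_m_eq la k
    have hMle : (PySem.List.slice la none (some k)).length ≤ la.length := pv_m_le la k
    have hsl : (pvS la).length = la.length := pv_s_len la
    have htlt : t < (PySem.List.slice la none (some k)).length := by
      by_contra hge
      rw [List.drop_eq_nil_of_le (by omega)] at hrest
      exact List.cons_ne_nil _ _ hrest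
    have htla : t < la.length := by omega
    have htS : t < (pvS la).length := by omega
    -- the processed element is the t-th sorted value
    have hv : v = (pvS la).getD t 0 := by
      have h0 : ((PySem.List.slice (pvS la) none (some k)).drop t).head? = some v := by
        rw [← hrest]; rfl
      rw [List.head?_drop] at h0
      conv at h0 => lhs; rw [pv_slice_to_take]
      rw [List.getElem?_take_of_lt (by omega), List.getElem?_eq_getElem htS] at h0
      rw [List.getD_eq_getElem _ _ htS]
      exact (Option.some_inj.1 h0).symm
    have hvS : (pvS la).getD t 0 = v := hv.symm
    have hrest' : rest' = (PySem.List.slice (pvS la) none (some k)).drop (t + 1) := by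
      have := congrArg List.tail hrest
      simpa [List.tail_drop] using this
    have hcnt_lt : pvCnt la t v < la.count v := by
      have h1 := pv_cnt_lt_count la htla
      rwa [hvS] at h1
    have hlen : pvCnt la t v < (pvOccs la v).length := by
      rw [pv_length_occs]; exact hcnt_lt
    have hidx_t : ((pvIdx la t : Nat) : Int) = (((pvOccs la v).getD (pvCnt la t v) 0 : Nat) : Int) := by
      unfold pvIdx; rw [hvS]
    have hsplit : (PySem.List.slice la none (some k)).length - t =
        ((PySem.List.slice la none (some k)).length - (t + 1)) + 1 := by omega
    by_cases hc : pvCnt la t v = 0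
    · -- first occurrence of v: ind1 = a.index(i)
      have hget : dup.get? v = none := by rw [hdup v, if_pos hc]
      rw [List.foldl_cons, pv_step_none la az ind dup acc v hget]
      have hidx : PySem.List.index? la v = some ((pvOccs la v).getD 0 0) := by
        rw [pv_index?_eq_head, List.head?_eq_getElem?,
          List.getElem?_eq_getElem (by omega : 0 < (pvOccs la v).length),
          List.getD_eq_getElem _ _ (by omega : 0 < (pvOccs la v).length)]
      rw [hidx]
      simp only [Option.getD_some]
      rw [ih (t + 1) az ind _ _ (by omega) hrest' ?_]
      · have hel : (((pvOccs la v).getD 0 0 : Nat) : Int) = ((pvIdx la t : Nat) : Int) := by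
          rw [hidx_t, hc]
        rw [hsplit, List.range'_succ, List.map_cons, List.append_assoc, List.singleton_append, hel]
      · intro w
        rw [PySem.Dict.get?_insert]
        by_cases hw : w = v
        · subst hw
          have h1 := pv_cnt_succ la t w htS
          rw [if_pos hvS, hc] at h1
          rw [if_pos rfl, h1]
          norm_num
        · have h1 := pv_cnt_succ la t w htS
          rw [if_neg (by rw [hvS]; exact fun he => hw he.symm), Nat.add_zero] at h1
          rw [if_neg hw, hdup w, h1]
          simp
    · -- repeated value: continue after the previous occurrence
      set c := pvCnt la t v with hcc
      set p := (pvOccs la v).getD (c - 1) 0 with hpp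
      have hget : dup.get? v = some ((p : Int) + 1) := by rw [hdup v, if_neg hc]
      rw [List.foldl_cons, pv_step_some la az ind dup acc v _ hget]
      have hc1 : c - 1 + 1 = c := by omega
      have hdrop : PySem.List.slice la (some ((p : Int) + 1)) none = la.drop (p + 1) := by
        have h0 := PySem.List.slice_from (xs := la) (a := (p : Int) + 1) (by omega)
        rw [h0]
        congr 1
      have hnx := pv_index?_drop la v (c' := c - 1) (by omega)
      rw [hc1] at hnx
      rw [← hpp] at hnx
      rw [← hdrop] at hnx
      rw [hnx]
      simp only [Option.getD_some]
      have hplt : p < (pvOccs la v).getD c 0 := by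
        rw [hpp]
        exact pv_occs_getD_strict la v (by omega) hlen
      have hq : (((pvOccs la v).getD c 0 - (p + 1) : Nat) : Int) =
          (((pvOccs la v).getD c 0 : Nat) : Int) - (p : Int) - 1 := by
        have : p + 1 ≤ (pvOccs la v).getD c 0 := by omega
        push_cast [this]
        ring
      have hind : (p : Int) + 1 + (((pvOccs la v).getD c 0 - (p + 1) : Nat) : Int) + 1 =
          (((pvOccs la v).getD c 0 : Nat) : Int) + 1 := by
        rw [hq]; ring
      rw [hind]
      rw [ih (t + 1) _ _ _ _ (by omega) hrest' ?_]
      · have hel : (((pvOccs la v).getD c 0 : Nat) : Int) + 1 - 1 = ((pvIdx la t : Nat) : Int) := by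
          rw [hidx_t]
          omega
        rw [hsplit, List.range'_succ, List.map_cons, List.append_assoc, List.singleton_append, hel]
      · intro w
        rw [PySem.Dict.get?_insert]
        by_cases hw : w = v
        · subst hw
          have h1 := pv_cnt_succ la t w htS
          rw [if_pos hvS] at h1
          rw [if_pos rfl, h1, ← hcc]
          have h2 : c + 1 ≠ 0 := by omega
          rw [if_neg h2]
          congr 1
        · have h1 := pv_cnt_succ la t w htS
          rw [if_neg (by rw [hvS]; exact fun he => hw he.symm), Nat.add_zero] at h1
          rw [if_neg hw, hdup w, h1]
          simp

-- B loops ---------------------------------------------------------------------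
theorem pv_B_find (la : List Int) (k : Int) {t : Nat}
    (ht : t < (PySem.List.slice la none (some k)).length) (used : PySem.Set Int)
    (hU : ∀ i : Nat, ((i : Int) ∈ used) ↔ ∃ u, u < t ∧ pvIdx la u = i) :
    pvBFind la used = ((pvIdx la t : Nat) : Int) := by
  have hMle : (PySem.List.slice la none (some k)).length ≤ la.length := pv_m_le la k
  have htla : t < la.length := by omega
  obtain ⟨hastar_lt, hastar_key⟩ := pv_idx_lt la htla
  -- the candidate produced by the spec is unused
  have hastar_unused : ((pvIdx la t : Nat) : Int) ∉ used := by
    rw [hU]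
    intro hex
    have := (pv_used_iff la (t := t) (by omega) hastar_lt).1 hex
    rw [hastar_key, pv_idx_numocc la htla] at this
    omega
  -- scan invariant
  have main : ∀ j : Nat, j ≤ la.length →
      (((PySem.List.pyRange 0 (j : Int) 1).foldl (fun best i =>
          if ¬ (PySem.Set.contains used i = true) ∧
             (best = -1 ∨ PySem.List.pyGetD la i 0 < PySem.List.pyGetD la best 0)
          then i else best) (-1) = -1) ∧ (∀ i : Nat, i < j → (i : Int) ∈ used)) ∨
      (∃ bn : Nat, (PySem.List.pyRange 0 (j : Int) 1).foldl (fun best i =>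
          if ¬ (PySem.Set.contains used i = true) ∧
             (best = -1 ∨ PySem.List.pyGetD la i 0 < PySem.List.pyGetD la best 0)
          then i else best) (-1) = (bn : Int) ∧ bn < j ∧ (bn : Int) ∉ used ∧
          (∀ i : Nat, i < j → (i : Int) ∉ used →
            la.getD bn 0 < la.getD i 0 ∨ (la.getD bn 0 = la.getD i 0 ∧ bn ≤ i))) := by
    intro j
    induction j with
    | zero =>
      intro _
      left
      constructor
      · rw [PySem.List.pyRange_one_eq_nil (by omega)]
        rfl
      · omega
    | succ j ihj =>
      intro hj
      have hcast : ((j + 1 : Nat) : Int) = (j : Int) + 1 := by push_cast; ring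
      rw [hcast, PySem.List.pyRange_one_succ_right (by positivity), List.foldl_append,
        List.foldl_cons, List.foldl_nil]
      rcases ihj (by omega) with ⟨hfold, hall⟩ | ⟨bn, hfold, hbnj, hbnun, hmin⟩
      · rw [hfold]
        by_cases hju : ((j : Int)) ∈ used
        · rw [if_neg (by
            rw [PySem.Set.contains_iff]
            simp [hju])]
          left
          refine ⟨rfl, ?_⟩
          intro i hi
          rcases Nat.lt_or_ge i j with h | h
          · exact hall i h
          · have : i = j := by omega
            rwa [this]
        · rw [if_pos (by
            rw [PySem.Set.contains_iff]
            exact ⟨by simpa using hju, Or.inl rfl⟩)]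
          right
          refine ⟨j, rfl, by omega, hju, ?_⟩
          intro i hi hiu
          rcases Nat.lt_or_ge i j with h | h
          · exact absurd (hall i h) hiu
          · have : i = j := by omega
            right
            rw [this]
            exact ⟨rfl, le_refl _⟩
      · rw [hfold]
        have hbnne : ((bn : Int)) ≠ -1 := by omega
        by_cases hju : ((j : Int)) ∈ used
        · rw [if_neg (by
            rw [PySem.Set.contains_iff]
            simp [hju])]
          right
          refine ⟨bn, rfl, by omega, hbnun, ?_⟩
          intro i hi hiu
          rcases Nat.lt_or_ge i j with h | h
          · exact hmin i h hiu
          · have : i = j := by omega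
            rw [this] at hiu
            exact absurd hju hiu
        · by_cases hlt : PySem.List.pyGetD la (j : Int) 0 < PySem.List.pyGetD la (bn : Int) 0
          · rw [if_pos (by
              rw [PySem.Set.contains_iff]
              exact ⟨by simpa using hju, Or.inr hlt⟩)]
            right
            rw [PySem.List.pyGetD_natCast, PySem.List.pyGetD_natCast] at hlt
            refine ⟨j, rfl, by omega, hju, ?_⟩
            intro i hi hiu
            rcases Nat.lt_or_ge i j with h | h
            · rcases hmin i h hiu with h2 | ⟨h2, h3⟩
              · left; omega
              · left; omega
            · have : i = j := by omega
              right
              rw [this]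
              exact ⟨rfl, le_refl _⟩
          · rw [if_neg (by
              rw [PySem.Set.contains_iff]
              rintro ⟨-, hor⟩
              rcases hor with h | h
              · exact hbnne h
              · exact hlt h)]
            right
            rw [PySem.List.pyGetD_natCast, PySem.List.pyGetD_natCast] at hlt
            refine ⟨bn, rfl, by omega, hbnun, ?_⟩
            intro i hi hiu
            rcases Nat.lt_or_ge i j with h | h
            · exact hmin i h hiu
            · have : i = j := by omega
              subst this
              rcases lt_or_eq_of_le (not_lt.1 hlt) with h2 | h2
              · left; exact h2
              · right; exact ⟨h2, by omega⟩
  -- conclude at j = la.length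
  have hres := main la.length (le_refl _)
  unfold pvBFind
  rcases hres with ⟨hfold, hall⟩ | ⟨bn, hfold, hbnn, hbnun, hmin⟩
  · exact absurd (hall (pvIdx la t) hastar_lt) hastar_unused
  · rw [hfold]
    -- bn is unused, hence carries a value ≥ the t-th sorted one
    have hbn_not : ¬ (la.take bn).count (la.getD bn 0) < pvCnt la t (la.getD bn 0) := by
      intro hcon
      exact hbnun ((hU bn).2 ((pv_used_iff la (t := t) (by omega) hbnn).2 hcon))
    have hsel := pv_sel_min la htla hbnn hbn_not
    have hforw := hmin (pvIdx la t) hastar_lt hastar_unused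
    have : bn = pvIdx la t := by
      rcases hsel with h1 | ⟨h1, h2⟩ <;> rcases hforw with h3 | ⟨h3, h4⟩ <;> omega
    rw [this]

theorem pv_B_loop (la : List Int) (k : Int) :
    ∀ t, t ≤ (PySem.List.slice la none (some k)).length →
      ((PySem.List.pyRange 0 (t : Int) 1).foldl (pvBStep la) (PySem.Set.empty, [])) =
        ((List.range t).map (fun u => ((pvIdx la u : Nat) : Int)),
         (List.range t).map (fun u => ((pvIdx la u : Nat) : Int))) := by
  intro t
  induction t with
  | zero =>
    intro _
    rw [PySem.List.pyRange_one_eq_nil (by omega)]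
    rfl
  | succ t iht =>
    intro ht
    have htM : t < (PySem.List.slice la none (some k)).length := by omega
    have htla : t < la.length := by
      have := pv_m_le la k
      omega
    have hcast : ((t + 1 : Nat) : Int) = (t : Int) + 1 := by push_cast; ring
    rw [hcast, PySem.List.pyRange_one_succ_right (by positivity), List.foldl_append,
      List.foldl_cons, List.foldl_nil, iht (by omega)]
    have hU : ∀ i : Nat, ((i : Int) ∈ (List.range t).map (fun u => ((pvIdx la u : Nat) : Int))) ↔
        ∃ u, u < t ∧ pvIdx la u = i := by
      intro i
      simp only [List.mem_map, List.mem_range]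
      constructor
      · rintro ⟨u, hu, hui⟩
        exact ⟨u, hu, by exact_mod_cast hui⟩
      · rintro ⟨u, hu, hui⟩
        exact ⟨u, hu, by exact_mod_cast hui⟩
    have hbest : pvBFind la ((List.range t).map (fun u => ((pvIdx la u : Nat) : Int))) =
        ((pvIdx la t : Nat) : Int) := pv_B_find la k htM _ hU
    show (PySem.Set.add _ _, _) = _
    rw [hbest]
    have hfresh : ((pvIdx la t : Nat) : Int) ∉
        (List.range t).map (fun u => ((pvIdx la u : Nat) : Int)) := by
      rw [hU]
      intro hex
      obtain ⟨hlt, hkey⟩ := pv_idx_lt la htla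
      have := (pv_used_iff la (t := t) (by omega) hlt).1 hex
      rw [hkey, pv_idx_numocc la htla] at this
      omega
    rw [PySem.Set.add_of_not_mem hfresh]
    rw [List.range_succ, List.map_append]
    rfl

-- final assembly --------------------------------------------------------------
theorem pv_final_fold (f g : Int → Int) (idxs : List Int) :
    ∀ acc1 acc2, idxs.foldl (fun (p : List Int × List Int) i => (p.1 ++ [f i], p.2 ++ [g i])) (acc1, acc2) =
      (acc1 ++ idxs.map f, acc2 ++ idxs.map g) := by
  induction idxs with
  | nil => simp
  | cons a l ih => intro acc1 acc2; simp [ih]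

theorem pv_main (la x y : List Int) (k : Int) :
    ∀ loc, find_k_elements la loc x y k = find_k_elements_alt la loc x y k := by
  intro loc
  have hA := pv_A_loop la k (PySem.List.slice (pvS la) none (some k)) 0 0 0
    PySem.Dict.empty [] (by omega) (by rw [List.drop_zero])
    (by
      intro w
      rw [PySem.Dict.get?_empty]
      have h0 : pvCnt la 0 w = 0 := rfl
      rw [h0]
      simp)
  have hB := pv_B_loop la k (PySem.List.slice la none (some k)).length (le_refl _)
  simp only [pvS] at hA
  simp only [find_k_elements, find_k_elements_alt]
  rw [hA, hB]
  rw [Nat.sub_zero, ← List.range_eq_range', List.nil_append]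
  rw [pv_final_fold]
  simp

-- ===== VERDICT (by name: the statement is the Claim_ definition above) =====
theorem find_k_elements_spec : Claim_equal_find_k_elements := by
  intro la loc x y k _ _
  unfold Spec_find_k_elements
  exact pv_main la x y k loc
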